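-- pv_equiv track=rewrite | github.com/JOSUEPORTALES/Redes-Neuronales-Python | 01 Enfoque_A_Grafos/0036 Búsqueda de la Política.py | generar_politica
-- ===== SOURCE A (Python) =====
-- import heapq
--
-- def generar_politica(grafo, objetivo):
--     politica = {}  # Aqui guardaremos la mejor accion desde cada nodo
--     costos = {nodo: float('inf') for nodo in grafo}  # Costos iniciales infinitos
--     costos[objetivo] = 0  # El costo de llegar al objetivo desde el objetivo es 0
--
--     # Cola de prioridad para explorar nodos por menor costo
--     cola = [(0, objetivo)]
--
--     while cola:
--         costo_actual, nodo = heapq.heappop(cola)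
--
--         for anterior in grafo:
--             for vecino, costo in grafo[anterior]:
--                 if vecino == nodo:
--                     nuevo_costo = costo_actual + costo
--                     if nuevo_costo < costos[anterior]:
--                         costos[anterior] = nuevo_costo
--                         politica[anterior] = nodo  # La mejor accion es ir hacia "nodo"
--                         heapq.heappush(cola, (nuevo_costo, anterior))
--
--     return politica
-- ===== SOURCE B (Python) =====
-- def generar_politica(grafo, objetivo):
--     # Incoming-edge index built once; the main loop keeps the agenda as a
--     # plain SORTED list (insert in order, pop the front) instead of a heap,
--     # and relaxes only the popped node's incoming edges instead of
--     # rescanning the whole graph on every pop.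
--     entrantes = {}
--     for origen, aristas in grafo.items():
--         for destino, costo in aristas:
--             entrantes.setdefault(destino, []).append((origen, costo))
--
--     politica = {}
--     costos = {nodo: float('inf') for nodo in grafo}
--     costos[objetivo] = 0
--
--     agenda = [(0, objetivo)]  # kept sorted ascending
--     while agenda:
--         costo_actual, nodo = agenda.pop(0)
--         for origen, costo in entrantes.get(nodo, []):
--             nuevo = costo_actual + costo
--             if nuevo < costos[origen]:
--                 costos[origen] = nuevo
--                 politica[origen] = nodo
--                 i = 0
--                 while i < len(agenda) and agenda[i] < (nuevo, origen):
--                     i += 1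
--                 agenda.insert(i, (nuevo, origen))
--     return politica
-- ===== Notes on version B (the rewrite author's own statement) =====
-- stated objective: alternative
-- what changed: B precomputes an incoming-edge index once and replaces the binary heap by a plain sorted agenda list (ordered insertion, pop the front), relaxing only the popped node's incoming edges instead of A's rescan of every edge of the whole graph on every heap pop; the relaxations happen in the same order, so the returned policy dict is identical.
import Mathlib
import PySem

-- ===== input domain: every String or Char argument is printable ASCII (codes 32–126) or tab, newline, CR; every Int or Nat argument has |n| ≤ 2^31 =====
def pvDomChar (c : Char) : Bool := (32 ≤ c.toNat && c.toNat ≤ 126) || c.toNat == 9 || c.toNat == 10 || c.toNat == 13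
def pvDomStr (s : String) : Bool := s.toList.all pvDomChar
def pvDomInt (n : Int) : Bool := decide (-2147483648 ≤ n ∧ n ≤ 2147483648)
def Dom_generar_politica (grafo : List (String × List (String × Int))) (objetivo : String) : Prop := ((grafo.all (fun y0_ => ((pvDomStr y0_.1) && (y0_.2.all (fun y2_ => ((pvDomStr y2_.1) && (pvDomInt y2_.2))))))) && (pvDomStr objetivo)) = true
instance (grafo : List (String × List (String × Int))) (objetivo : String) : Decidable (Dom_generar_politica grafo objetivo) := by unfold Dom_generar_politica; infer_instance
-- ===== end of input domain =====

-- B builds an incoming-edge index once and keeps the agenda as a SORTED list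
-- (ordered insertion, pop the front) instead of A's binary heap with a rescan of
-- every edge of the graph per pop; the relaxations happen in the same order, so
-- the returned policy dict (items and order) is identical.

-- ===== PORT A =====
-- model of heapq on (Int, String) tuples: heappop returns the lexicographically
-- least tuple of the multiset; equal tuples are identical values, so 'least,
-- remove one occurrence' is exact for the observable value
def pvLt (a b : Int × String) : Bool := decide (a.1 < b.1) || (a.1 == b.1 && decide (a.2 < b.2))

def pvHeapPop (cola : List (Int × String)) : Option ((Int × String) × List (Int × String)) :=
  match cola with
  | [] => none
  | x :: xs =>
    let m := xs.foldl (fun m y => if pvLt y m then y else m) x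
    some (m, (x :: xs).erase m)

-- loop state: (politica, costos, cola); costos value none models float('inf')
abbrev PvSt := PySem.Dict String String × PySem.Dict String (Option Int) × List (Int × String)

-- one relaxation: 'nuevo = costo_actual + costo; if nuevo < costos[anterior]: ...'
def relaxStep (nodo : String) (costo_actual : Int) (st : PvSt) (arc : String × Int) : PvSt :=
  let nuevo := costo_actual + arc.2
  let mejor := match st.2.1.getD arc.1 none with
    | none => true            -- float('inf'): any int is smaller
    | some c => decide (nuevo < c)
  if mejor then
    (st.1.insert arc.1 nodo, st.2.1.insert arc.1 (some nuevo), st.2.2 ++ [(nuevo, arc.1)])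
  else st

-- A's body of one pop: 'for anterior in grafo: for vecino, costo in grafo[anterior]: if vecino == nodo: ...'
def relaxA (grafo : List (String × List (String × Int))) (nodo : String) (costo_actual : Int)
    (st : PvSt) : PvSt :=
  grafo.foldl (fun st p =>
    p.2.foldl (fun st e =>
      if e.1 == nodo then relaxStep nodo costo_actual st (p.1, e.2) else st) st) st

-- fuel: an upper bound on the number of 'while' iterations whenever the Python
-- loop terminates (each push strictly decreases an integer label whose range is
-- bounded by the sum of edge-weight magnitudes); both ports use the same fuel
def pvFuel (grafo : List (String × List (String × Int))) : Nat :=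
  (grafo.length + 2) *
    (2 * (grafo.foldl (fun s p => p.2.foldl (fun s e => s + e.2.natAbs + 1) s) 0) + 4) + 2

-- 'costos = {nodo: inf for nodo in grafo}; costos[objetivo] = 0'
def initCostos (grafo : List (String × List (String × Int))) (objetivo : String) :
    PySem.Dict String (Option Int) :=
  (grafo.foldl (fun d p => d.insert p.1 (none : Option Int)) PySem.Dict.empty).insert objetivo (some 0)

def loopA (fuel : Nat) (grafo : List (String × List (String × Int))) (st : PvSt) :
    PySem.Dict String String :=
  match fuel with
  | 0 => st.1
  | fuel + 1 =>
    match pvHeapPop st.2.2 with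
    | none => st.1
    | some ((costo_actual, nodo), rest) =>
      loopA fuel grafo (relaxA grafo nodo costo_actual (st.1, st.2.1, rest))

def generar_politica (grafo : List (String × List (String × Int))) (objetivo : String) : List (String × String) :=
  (loopA (pvFuel grafo) grafo (PySem.Dict.empty, initCostos grafo objetivo, [(0, objetivo)])).items

-- ===== PORT B =====
-- 'entrantes = {}; for origen, aristas in grafo.items(): for destino, costo in aristas:
--    entrantes.setdefault(destino, []).append((origen, costo))'
def buildRev (grafo : List (String × List (String × Int))) :
    PySem.Dict String (List (String × Int)) :=
  grafo.foldl (fun d p =>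
    p.2.foldl (fun d e => d.modify e.1 [] (fun l => l ++ [(p.1, e.2)])) d) PySem.Dict.empty

-- 'i = 0; while i < len(agenda) and agenda[i] < x: i += 1; agenda.insert(i, x)'
def pvInsort (x : Int × String) : List (Int × String) → List (Int × String)
  | [] => [x]
  | y :: ys => if pvLt y x then y :: pvInsort x ys else x :: y :: ys

-- 'nuevo = costo_actual + costo; if nuevo < costos[origen]: ... ordered insertion'
def relaxStepB (nodo : String) (costo_actual : Int) (st : PvSt) (arc : String × Int) : PvSt :=
  match st with
  | (pol, costos, agenda) =>
    match costos.getD arc.1 none with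
    | some viejo =>
      if costo_actual + arc.2 < viejo then
        (pol.insert arc.1 nodo, costos.insert arc.1 (some (costo_actual + arc.2)),
         pvInsort (costo_actual + arc.2, arc.1) agenda)
      else (pol, costos, agenda)
    | none =>
      (pol.insert arc.1 nodo, costos.insert arc.1 (some (costo_actual + arc.2)),
       pvInsort (costo_actual + arc.2, arc.1) agenda)

-- 'for origen, costo in entrantes.get(nodo, []): ...'
def relaxB (rev : PySem.Dict String (List (String × Int))) (nodo : String) (costo_actual : Int)
    (st : PvSt) : PvSt :=
  (rev.getD nodo []).foldl (relaxStepB nodo costo_actual) st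

-- 'while agenda: costo_actual, nodo = agenda.pop(0); ...'
def loopB (fuel : Nat) (rev : PySem.Dict String (List (String × Int))) (st : PvSt) :
    PySem.Dict String String :=
  match fuel with
  | 0 => st.1
  | fuel + 1 =>
    match st.2.2 with
    | [] => st.1
    | (costo_actual, nodo) :: resto =>
      loopB fuel rev (relaxB rev nodo costo_actual (st.1, st.2.1, resto))

def generar_politica_alt (grafo : List (String × List (String × Int))) (objetivo : String) : List (String × String) :=
  (loopB (pvFuel grafo) (buildRev grafo)
    (PySem.Dict.empty,
     (grafo.foldl (fun d p => d.insert p.1 (none : Option Int)) PySem.Dict.empty).insert objetivo (some 0),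
     [(0, objetivo)])).items

-- ===== PRECONDITION & SPEC =====
def Spec_generar_politica (grafo : List (String × List (String × Int))) (objetivo : String) (out : List (String × String)) : Prop := out = generar_politica_alt grafo objetivo
instance (grafo : List (String × List (String × Int))) (objetivo : String) (out : List (String × String)) : Decidable (Spec_generar_politica grafo objetivo out) := by unfold Spec_generar_politica; infer_instance

-- ===== CLAIM =====
def Claim_equal_generar_politica : Prop := ∀ (grafo : List (String × List (String × Int))) (objetivo : String), Dom_generar_politica grafo objetivo → Spec_generar_politica grafo objetivo (generar_politica grafo objetivo)

-- ===== LEMMAS AND PROOFS =====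

theorem pvLt_false_iff (a b : Int × String) :
    pvLt a b = false ↔ b.1 ≤ a.1 ∧ (a.1 = b.1 → b.2 ≤ a.2) := by
  simp only [pvLt, Bool.or_eq_false_iff, decide_eq_false_iff_not, not_lt,
    Bool.and_eq_false_iff, beq_eq_false_iff_ne, ne_eq]
  constructor
  · rintro ⟨h1, h2 | h2⟩
    · exact ⟨h1, fun he => absurd he h2⟩
    · exact ⟨h1, fun _ => not_lt.mp h2⟩
  · rintro ⟨h1, h2⟩
    refine ⟨h1, ?_⟩
    by_cases he : a.1 = b.1
    · exact Or.inr (not_lt.mpr (h2 he))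
    · exact Or.inl he

theorem pvLt_irrefl (a : Int × String) : pvLt a a = false := by
  rw [pvLt_false_iff]; exact ⟨le_refl _, fun _ => le_refl _⟩

theorem pvLt_asymm {a b : Int × String} (h : pvLt a b = true) : pvLt b a = false := by
  rw [pvLt_false_iff]
  simp only [pvLt, Bool.or_eq_true, decide_eq_true_eq, Bool.and_eq_true, beq_iff_eq] at h
  rcases h with h | ⟨h1, h2⟩
  · exact ⟨le_of_lt h, fun he => absurd (he ▸ h) (lt_irrefl _)⟩
  · exact ⟨le_of_eq h1, fun _ => le_of_lt h2⟩

theorem pvLt_ge_trans {a b c : Int × String} (h1 : pvLt b a = false) (h2 : pvLt c b = false) :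
    pvLt c a = false := by
  rw [pvLt_false_iff] at *
  rcases h1 with ⟨ha1, ha2⟩; rcases h2 with ⟨hb1, hb2⟩
  refine ⟨le_trans ha1 hb1, fun he => ?_⟩
  have e1 : b.1 = a.1 := by omega
  have e2 : c.1 = b.1 := by omega
  exact le_trans (ha2 e1) (hb2 e2)

theorem pvLt_antisymm_eq {a b : Int × String} (h1 : pvLt a b = false) (h2 : pvLt b a = false) :
    a = b := by
  rw [pvLt_false_iff] at h1 h2
  have e1 : a.1 = b.1 := le_antisymm h2.1 h1.1
  have e2 : a.2 = b.2 := le_antisymm (h2.2 e1.symm) (h1.2 e1)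
  exact Prod.ext e1 e2

abbrev pvLe (a b : Int × String) : Prop := pvLt b a = false

theorem pvInsort_perm (x : Int × String) (l : List (Int × String)) :
    (x :: l).Perm (pvInsort x l) := by
  induction l with
  | nil => simp [pvInsort]
  | cons y ys ih =>
    by_cases h : pvLt y x = true
    · simp only [pvInsort, h, if_pos]
      exact (List.Perm.swap y x ys).trans (List.Perm.cons y ih)
    · simp [pvInsort, h]

theorem pvInsort_mem {z x : Int × String} {l : List (Int × String)}
    (h : z ∈ pvInsort x l) : z = x ∨ z ∈ l := by
  have := (pvInsort_perm x l).mem_iff.mpr h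
  simpa using this

theorem pvInsort_sorted (x : Int × String) {l : List (Int × String)}
    (h : l.Pairwise pvLe) : (pvInsort x l).Pairwise pvLe := by
  induction l with
  | nil => simp [pvInsort, pvLe]
  | cons y ys ih =>
    rcases List.pairwise_cons.mp h with ⟨hy, hys⟩
    by_cases hc : pvLt y x = true
    · simp only [pvInsort]
      rw [if_pos hc]
      refine List.pairwise_cons.mpr ⟨?_, ih hys⟩
      intro z hz
      rcases pvInsort_mem hz with rfl | hz
      · exact pvLt_asymm hc
      · exact hy z hz
    · have hc' : pvLt y x = false := by simpa using hc
      simp only [pvInsort]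
      rw [if_neg hc]
      refine List.pairwise_cons.mpr ⟨?_, h⟩
      intro z hz
      rcases List.mem_cons.mp hz with rfl | hz
      · exact hc'
      · exact pvLt_ge_trans hc' (hy z hz)

theorem foldlMin_spec (xs : List (Int × String)) : ∀ (x : Int × String),
    (xs.foldl (fun m y => if pvLt y m then y else m) x) ∈ x :: xs ∧
      ∀ z ∈ x :: xs, pvLt z (xs.foldl (fun m y => if pvLt y m then y else m) x) = false := by
  induction xs with
  | nil => intro x; exact ⟨List.mem_singleton.mpr rfl, by simpa using pvLt_irrefl x⟩
  | cons y ys ih =>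
    intro x
    simp only [List.foldl_cons]
    by_cases h : pvLt y x = true
    · rw [if_pos h]
      rcases ih y with ⟨hm, hmin⟩
      refine ⟨List.mem_cons_of_mem x hm, ?_⟩
      intro z hz
      rcases List.mem_cons.mp hz with rfl | hz
      · exact pvLt_ge_trans (hmin y List.mem_cons_self) (pvLt_asymm h)
      · exact hmin z hz
    · have h' : pvLt y x = false := by simpa using h
      rw [if_neg h]
      rcases ih x with ⟨hm, hmin⟩
      constructor
      · rcases List.mem_cons.mp hm with he | he
        · rw [he]; exact List.mem_cons_self
        · exact List.mem_cons_of_mem _ (List.mem_cons_of_mem _ he)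
      · intro z hz
        rcases List.mem_cons.mp hz with he | hz
        · rw [he]; exact hmin x List.mem_cons_self
        · rcases List.mem_cons.mp hz with he | hz
          · rw [he]; exact pvLt_ge_trans (hmin x List.mem_cons_self) h'
          · exact hmin z (List.mem_cons_of_mem _ hz)

theorem pvHeapPop_def (x : Int × String) (xs : List (Int × String)) :
    pvHeapPop (x :: xs) =
      some (xs.foldl (fun m y => if pvLt y m then y else m) x,
        (x :: xs).erase (xs.foldl (fun m y => if pvLt y m then y else m) x)) := rfl

theorem pvHeapPop_sim {cola t : List (Int × String)} {hd : Int × String}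
    (hperm : cola.Perm (hd :: t)) (hsort : (hd :: t).Pairwise pvLe) :
    ∃ rest, pvHeapPop cola = some (hd, rest) ∧ rest.Perm t := by
  cases cola with
  | nil => exact absurd hperm (by simp)
  | cons x xs =>
    rcases foldlMin_spec xs x with ⟨hm, hmin⟩
    have hmem : (xs.foldl (fun m y => if pvLt y m then y else m) x) ∈ hd :: t :=
      hperm.mem_iff.mp hm
    have hhd : hd ∈ x :: xs := hperm.mem_iff.mpr List.mem_cons_self
    have h1 : pvLt hd (xs.foldl (fun m y => if pvLt y m then y else m) x) = false := hmin hd hhd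
    have h2 : pvLt (xs.foldl (fun m y => if pvLt y m then y else m) x) hd = false := by
      rcases List.mem_cons.mp hmem with he | hmem'
      · rw [he]; exact pvLt_irrefl hd
      · exact (List.pairwise_cons.mp hsort).1 _ hmem'
    have he : (xs.foldl (fun m y => if pvLt y m then y else m) x) = hd :=
      pvLt_antisymm_eq h2 h1
    refine ⟨(x :: xs).erase hd, ?_, ?_⟩
    · rw [pvHeapPop_def, he]
    · have := hperm.erase hd
      simpa [List.erase_cons_head] using this

def QRel (sA sB : PvSt) : Prop :=
  sA.1 = sB.1 ∧ sA.2.1 = sB.2.1 ∧ sA.2.2.Perm sB.2.2 ∧ sB.2.2.Pairwise pvLe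

theorem relaxStep_sim (nodo : String) (c : Int) (arc : String × Int)
    {sA sB : PvSt} (h : QRel sA sB) :
    QRel (relaxStep nodo c sA arc) (relaxStepB nodo c sB arc) := by
  obtain ⟨pol, costos, cola⟩ := sA
  obtain ⟨pol', costos', agenda⟩ := sB
  obtain ⟨h1, h2, h3, h4⟩ := h
  dsimp at h1 h2 h3 h4
  subst h1; subst h2
  unfold relaxStep relaxStepB
  dsimp
  cases hg : costos.getD arc.1 none with
  | none =>
    simp only [if_pos]
    refine ⟨rfl, rfl, ?_, ?_⟩
    · exact (List.perm_append_singleton _ _).trans ((h3.cons _).trans (pvInsort_perm _ _))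
    · exact pvInsort_sorted _ h4
  | some viejo =>
    by_cases hlt : c + arc.2 < viejo
    · simp only [hlt, decide_true, if_pos]
      refine ⟨rfl, rfl, ?_, ?_⟩
      · exact (List.perm_append_singleton _ _).trans ((h3.cons _).trans (pvInsort_perm _ _))
      · exact pvInsort_sorted _ h4
    · simp only [hlt, decide_false, if_neg, Bool.false_eq_true, not_false_iff]
      exact ⟨rfl, rfl, h3, h4⟩

theorem relax_foldl_sim (nodo : String) (c : Int) (arcs : List (String × Int)) :
    ∀ {sA sB : PvSt}, QRel sA sB →
      QRel (arcs.foldl (relaxStep nodo c) sA) (arcs.foldl (relaxStepB nodo c) sB) := by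
  induction arcs with
  | nil => intro _ _ h; exact h
  | cons a t ih => intro sA sB h; exact ih (relaxStep_sim nodo c a h)

theorem foldl_guard_filter_map {α β σ : Type} (p : α → Bool) (g : α → β) (f : σ → β → σ) :
    ∀ (l : List α) (s : σ),
      l.foldl (fun s a => if p a then f s (g a) else s) s = ((l.filter p).map g).foldl f s := by
  intro l
  induction l with
  | nil => intro s; rfl
  | cons a t ih =>
    intro s
    by_cases h : p a = true
    · simp [List.foldl_cons, h, ih]
    · simp [List.foldl_cons, h, ih]

def edgesOf (grafo : List (String × List (String × Int))) : List (String × (String × Int)) :=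
  grafo.flatMap (fun p => p.2.map (fun e => (e.1, (p.1, e.2))))

theorem buildRev_eq_foldl (grafo : List (String × List (String × Int))) :
    buildRev grafo =
      (edgesOf grafo).foldl (fun d q => d.modify q.1 [] (· ++ [q.2])) PySem.Dict.empty := by
  unfold buildRev edgesOf
  rw [List.foldl_flatMap]
  simp [List.foldl_map]

theorem buildRev_getD (grafo : List (String × List (String × Int))) (nodo : String) :
    (buildRev grafo).getD nodo [] =
      ((edgesOf grafo).filter (fun q => q.1 == nodo)).map (·.2) := by
  rw [buildRev_eq_foldl]
  rw [PySem.Dict.getD_foldl_modify_append]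
  simp

theorem relaxA_eq (grafo : List (String × List (String × Int))) (nodo : String)
    (costo_actual : Int) (st : PvSt) :
    relaxA grafo nodo costo_actual st =
      ((buildRev grafo).getD nodo []).foldl (relaxStep nodo costo_actual) st := by
  unfold relaxA
  rw [buildRev_getD]
  unfold edgesOf
  rw [List.filter_flatMap, List.map_flatMap, List.foldl_flatMap]
  have hfun : (fun (st : PvSt) (p : String × List (String × Int)) =>
        p.2.foldl (fun st e =>
          if e.1 == nodo then relaxStep nodo costo_actual st (p.1, e.2) else st) st)
      = (fun (st : PvSt) (p : String × List (String × Int)) =>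
        ((p.2.map (fun e => (e.1, (p.1, e.2)))).filter (fun q => q.1 == nodo)).foldl
          (fun st q => relaxStep nodo costo_actual st q.2) st) := by
    funext st p
    rw [foldl_guard_filter_map (fun e => e.1 == nodo) (fun e => ((p.1, e.2) : String × Int))
        (relaxStep nodo costo_actual) p.2 st]
    simp only [List.filter_map, List.foldl_map]
    rfl
  rw [hfun]
  simp [List.foldl_map]

theorem loop_sim (fuel : Nat) (grafo : List (String × List (String × Int)))
    {sA sB : PvSt} (h : QRel sA sB) :
    loopA fuel grafo sA = loopB fuel (buildRev grafo) sB := by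
  induction fuel generalizing sA sB with
  | zero => exact h.1
  | succ n ih =>
    obtain ⟨h1, h2, h3, h4⟩ := h
    unfold loopA loopB
    cases hb : sB.2.2 with
    | nil =>
      have : sA.2.2 = [] := List.Perm.eq_nil (hb ▸ h3)
      rw [this]
      simp [pvHeapPop, h1]
    | cons hd t =>
      have hsort : (hd :: t).Pairwise pvLe := hb ▸ h4
      rcases pvHeapPop_sim (hb ▸ h3) hsort with ⟨rest, hpop, hrperm⟩
      rw [hpop]
      obtain ⟨c, nodo⟩ := hd
      dsimp only
      rw [relaxA_eq]
      show _ = loopB n (buildRev grafo) (relaxB (buildRev grafo) nodo c (sB.1, sB.2.1, t))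
      unfold relaxB
      exact ih (relax_foldl_sim nodo c _ ⟨by simpa using h1, by simpa using h2, by simpa using hrperm, (List.pairwise_cons.mp hsort).2⟩)

-- ===== VERDICT =====
theorem generar_politica_spec : Claim_equal_generar_politica := by
  intro grafo objetivo _
  unfold Spec_generar_politica generar_politica generar_politica_alt initCostos
  rw [loop_sim (pvFuel grafo) grafo
    (⟨rfl, rfl, List.Perm.refl _, by simp [pvLe]⟩ : QRel _ _)]
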